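-- pv_equiv track=rewrite | github.com/VanshMiglani007/DELPHI | backend/core/scorer.py | calculate_agent_score
-- ===== SOURCE A (Python) =====
-- def calculate_agent_score(findings):
--     score = 100
--     for finding in findings:
--         severity = finding.get('severity', 'LOW')
--         if severity == 'CRITICAL':
--             score -= 20
--         elif severity == 'HIGH':
--             score -= 10
--         elif severity == 'MEDIUM':
--             score -= 5
--         elif severity == 'LOW':
--             score -= 2
--     return max(0, score)
-- ===== SOURCE B (Python) =====
-- def calculate_agent_score(findings):
--     # Frequency table of severities first, then closed-form aggregation.
--     counts = {}
--     for finding in findings: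
--         severity = finding.get('severity', 'LOW')
--         counts[severity] = counts.get(severity, 0) + 1
--     penalty = (20 * counts.get('CRITICAL', 0)
--                + 10 * counts.get('HIGH', 0)
--                + 5 * counts.get('MEDIUM', 0)
--                + 2 * counts.get('LOW', 0))
--     return max(0, 100 - penalty)
-- ===== Notes on version B (the rewrite author's own statement) =====
-- stated objective: alternative
-- what changed: Replaces the streaming if/elif score subtraction with a severity frequency table built in one pass and a closed-form penalty computed from the four counts.
import Mathlib
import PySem

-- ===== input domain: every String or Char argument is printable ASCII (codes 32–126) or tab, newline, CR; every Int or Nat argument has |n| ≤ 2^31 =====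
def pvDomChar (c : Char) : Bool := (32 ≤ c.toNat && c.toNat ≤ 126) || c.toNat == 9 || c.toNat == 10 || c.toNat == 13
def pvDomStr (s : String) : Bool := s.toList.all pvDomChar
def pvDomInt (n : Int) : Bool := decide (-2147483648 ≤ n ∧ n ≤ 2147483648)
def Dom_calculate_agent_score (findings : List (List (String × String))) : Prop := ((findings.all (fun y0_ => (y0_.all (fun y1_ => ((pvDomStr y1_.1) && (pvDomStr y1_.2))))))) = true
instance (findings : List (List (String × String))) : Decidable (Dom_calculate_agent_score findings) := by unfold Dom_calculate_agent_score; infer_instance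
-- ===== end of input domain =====

-- ===== PORT A =====
-- Port of A: fold over findings, subtracting per-severity penalty, clamp at 0 at the end.
def calculate_agent_score (findings : List (List (String × String))) : Int :=
  let score := findings.foldl (fun score finding =>
    let severity := (PySem.Dict.mk finding).getD "severity" "LOW"
    if severity = "CRITICAL" then score - 20
    else if severity = "HIGH" then score - 10
    else if severity = "MEDIUM" then score - 5
    else if severity = "LOW" then score - 2
    else score) 100
  max 0 score

-- ===== PORT B =====
-- Port of B: build a frequency table of severities, then compute the penalty in closed form.
def calculate_agent_score_alt (findings : List (List (String × String))) : Int :=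
  let counts := findings.foldl (fun counts finding =>
    let severity := (PySem.Dict.mk finding).getD "severity" "LOW"
    counts.insert severity (counts.getD severity 0 + 1)) PySem.Dict.empty
  let penalty := 20 * counts.getD "CRITICAL" 0 + 10 * counts.getD "HIGH" 0
               + 5 * counts.getD "MEDIUM" 0 + 2 * counts.getD "LOW" 0
  max 0 (100 - penalty)

-- ===== PRECONDITION & SPEC =====
def Spec_calculate_agent_score (findings : List (List (String × String))) (out : Int) : Prop := out = calculate_agent_score_alt findings
instance (findings : List (List (String × String))) (out : Int) : Decidable (Spec_calculate_agent_score findings out) := by unfold Spec_calculate_agent_score; infer_instance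

-- ===== CLAIM (what is proved, stated in full; the proofs are below) =====
def Claim_equal_calculate_agent_score : Prop := ∀ (findings : List (List (String × String))), Dom_calculate_agent_score findings → Spec_calculate_agent_score findings (calculate_agent_score findings)

-- ===== LEMMAS AND PROOFS =====

-- ===== VERDICT (by name: the statement is the Claim_ definition above) =====
-- penalty of a single severity string
def pvPen (s : String) : Int :=
  if s = "CRITICAL" then 20 else if s = "HIGH" then 10
  else if s = "MEDIUM" then 5 else if s = "LOW" then 2 else 0

lemma foldA_eq (fs : List (List (String × String))) (s : Int) :
    fs.foldl (fun score finding =>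
      let severity := (PySem.Dict.mk finding).getD "severity" "LOW"
      if severity = "CRITICAL" then score - 20
      else if severity = "HIGH" then score - 10
      else if severity = "MEDIUM" then score - 5
      else if severity = "LOW" then score - 2
      else score) s
    = s - ((fs.map (fun f => pvPen ((PySem.Dict.mk f).getD "severity" "LOW"))).sum) := by
  induction fs generalizing s with
  | nil => simp
  | cons f t ih =>
    simp only [List.foldl_cons, List.map_cons, List.sum_cons, ih, pvPen]
    split_ifs <;> ring

lemma sum_pen_eq_counts (l : List String) :
    (l.map pvPen).sum
      = 20 * (l.count "CRITICAL" : Int) + 10 * (l.count "HIGH" : Int)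
      + 5 * (l.count "MEDIUM" : Int) + 2 * (l.count "LOW" : Int) := by
  induction l with
  | nil => simp
  | cons x t ih =>
    simp only [List.map_cons, List.sum_cons, ih, pvPen, List.count_cons]
    split_ifs <;> simp_all <;> ring

theorem calculate_agent_score_spec : Claim_equal_calculate_agent_score := by
  intro fs _
  unfold Spec_calculate_agent_score calculate_agent_score calculate_agent_score_alt
  have hcnt : ∀ v : String,
      (fs.foldl (fun counts finding =>
        let severity := (PySem.Dict.mk finding).getD "severity" "LOW"
        counts.insert severity (counts.getD severity 0 + 1)) PySem.Dict.empty).getD v 0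
      = ((fs.map (fun f => (PySem.Dict.mk f).getD "severity" "LOW")).count v : Int) := by
    intro v
    have h := PySem.Dict.getD_foldl_insert_add_one
      (l := fs.map (fun f => (PySem.Dict.mk f).getD "severity" "LOW"))
      (d := (PySem.Dict.empty : PySem.Dict String Int)) (v := v)
    rw [List.foldl_map] at h
    simpa using h
  simp only [hcnt, foldA_eq]
  have h2 := sum_pen_eq_counts (fs.map (fun f => (PySem.Dict.mk f).getD "severity" "LOW"))
  simp only [List.map_map, Function.comp_def] at h2
  rw [h2]
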